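-- pv_equiv track=rewrite | github.com/LuanoRodrigues/3Cs-attribution-Framework | Research/synthesis.py | _group_claims_by_section
-- ===== SOURCE A (Python) =====
-- from typing import Any, Dict, List, Tuple
--
-- def _group_claims_by_section(stream_b_rows: List[Dict[str, Any]]) -> Dict[str, List[Dict[str, Any]]]:
--     buckets: Dict[str, List[Dict[str, Any]]] = {
--         "Definitions": [],
--         "Main findings": [],
--         "Methods": [],
--         "Limitations": [],
--         "Future work": [],
--     }
--     for r in stream_b_rows:
--         t = r["extraction_type"]
--         if t == "definition":
--             buckets["Definitions"].append(r)
--         if t == "main_finding":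
--             buckets["Main findings"].append(r)
--         if t == "method_claim":
--             buckets["Methods"].append(r)
--         if t == "limitation":
--             buckets["Limitations"].append(r)
--         if t == "recommendation":
--             buckets["Future work"].append(r)
--     return buckets
-- ===== SOURCE B (Python) =====
-- from typing import Any, Dict, List
--
-- _SECTIONS = [
--     ("Definitions", "definition"),
--     ("Main findings", "main_finding"),
--     ("Methods", "method_claim"),
--     ("Limitations", "limitation"),
--     ("Future work", "recommendation"),
-- ]
--
-- def _group_claims_by_section(stream_b_rows: List[Dict[str, Any]]) -> Dict[str, List[Dict[str, Any]]]:
--     return {section: [r for r in stream_b_rows if r["extraction_type"] == t]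
--             for section, t in _SECTIONS}
-- ===== Notes on version B (the rewrite author's own statement) =====
-- stated objective: idiomatic
-- what changed: Replaces the mutate-buckets loop with an if-cascade by a dict comprehension over a constant section table, building each bucket as a filter of the rows.
import Mathlib
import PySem

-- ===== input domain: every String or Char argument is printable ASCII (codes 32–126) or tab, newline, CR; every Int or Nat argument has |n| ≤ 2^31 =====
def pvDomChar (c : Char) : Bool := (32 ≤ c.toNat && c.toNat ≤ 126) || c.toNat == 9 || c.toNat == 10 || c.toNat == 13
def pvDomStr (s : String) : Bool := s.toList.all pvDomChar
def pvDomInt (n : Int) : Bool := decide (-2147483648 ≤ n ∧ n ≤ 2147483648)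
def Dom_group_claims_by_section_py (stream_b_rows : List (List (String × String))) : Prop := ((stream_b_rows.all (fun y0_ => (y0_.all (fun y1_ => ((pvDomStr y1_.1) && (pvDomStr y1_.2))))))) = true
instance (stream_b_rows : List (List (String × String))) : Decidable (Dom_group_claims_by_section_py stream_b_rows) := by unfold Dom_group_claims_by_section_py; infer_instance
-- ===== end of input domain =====

-- B replaces A's mutate-five-buckets loop with an if-cascade by a dict comprehension over a
-- constant section table, each bucket a filter of the rows (idiomatic; same exact result).

-- ===== PORT A =====
-- r["extraction_type"]: first-match lookup in the row; Python raises KeyError when absent,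
-- which Pre_ excludes, so the .getD "" default is never reached on admitted inputs.
def pvRowType (r : List (String × String)) : String :=
  ((PySem.Dict.mk r).get? "extraction_type").getD ""

def pvStepA (b : PySem.Dict String (List (List (String × String)))) (r : List (String × String)) :
    PySem.Dict String (List (List (String × String))) :=
  let t := pvRowType r
  let b := if t == "definition" then b.modify "Definitions" [] (· ++ [r]) else b
  let b := if t == "main_finding" then b.modify "Main findings" [] (· ++ [r]) else b
  let b := if t == "method_claim" then b.modify "Methods" [] (· ++ [r]) else b
  let b := if t == "limitation" then b.modify "Limitations" [] (· ++ [r]) else b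
  let b := if t == "recommendation" then b.modify "Future work" [] (· ++ [r]) else b
  b

def group_claims_by_section_py (stream_b_rows : List (List (String × String))) :
    List (String × List (List (String × String))) :=
  (stream_b_rows.foldl pvStepA
    (PySem.Dict.mk [("Definitions", []), ("Main findings", []), ("Methods", []),
                    ("Limitations", []), ("Future work", [])])).items

-- ===== PORT B =====
def pvSections : List (String × String) :=
  [("Definitions", "definition"), ("Main findings", "main_finding"), ("Methods", "method_claim"),
   ("Limitations", "limitation"), ("Future work", "recommendation")]

-- the dict comprehension's keys (the section names) are distinct, so the built dict IS this item list
def group_claims_by_section_py_alt (stream_b_rows : List (List (String × String))) :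
    List (String × List (List (String × String))) :=
  pvSections.map (fun p => (p.1, stream_b_rows.filter (fun r => pvRowType r == p.2)))

-- ===== PRECONDITION & SPEC =====
-- Pre_ excludes rows without an "extraction_type" key, on which Python A (and B) raise KeyError.
def Pre_group_claims_by_section_py (stream_b_rows : List (List (String × String))) : Prop :=
  ∀ r ∈ stream_b_rows, "extraction_type" ∈ r.map Prod.fst
instance (stream_b_rows : List (List (String × String))) : Decidable (Pre_group_claims_by_section_py stream_b_rows) := by unfold Pre_group_claims_by_section_py; infer_instance

def pvWitness_group_claims_by_section_py : (List (List (String × String))) :=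
  [[("extraction_type", "definition"), ("claim", "x")],
   [("extraction_type", "junk")]]

def Spec_group_claims_by_section_py (stream_b_rows : List (List (String × String))) (out : List (String × List (List (String × String)))) : Prop := out = group_claims_by_section_py_alt stream_b_rows
instance (stream_b_rows : List (List (String × String))) (out : List (String × List (List (String × String)))) : Decidable (Spec_group_claims_by_section_py stream_b_rows out) := by unfold Spec_group_claims_by_section_py; infer_instance

-- ===== CLAIM (what is proved, stated in full; the proofs are below) =====
def Claim_equal_group_claims_by_section_py : Prop := ∀ (stream_b_rows : List (List (String × String))), Dom_group_claims_by_section_py stream_b_rows → Pre_group_claims_by_section_py stream_b_rows → Spec_group_claims_by_section_py stream_b_rows (group_claims_by_section_py stream_b_rows)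

-- ===== LEMMAS AND PROOFS =====

-- Loop invariant: folding A's step over any rows from a canonical five-bucket dict appends,
-- bucket by bucket, exactly the rows B's five filters select.
lemma pvFoldA_items (rows : List (List (String × String)))
    (l1 l2 l3 l4 l5 : List (List (String × String))) :
    (rows.foldl pvStepA
      (PySem.Dict.mk [("Definitions", l1), ("Main findings", l2), ("Methods", l3),
                      ("Limitations", l4), ("Future work", l5)])).items =
    [("Definitions", l1 ++ rows.filter (fun r => pvRowType r == "definition")),
     ("Main findings", l2 ++ rows.filter (fun r => pvRowType r == "main_finding")),
     ("Methods", l3 ++ rows.filter (fun r => pvRowType r == "method_claim")),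
     ("Limitations", l4 ++ rows.filter (fun r => pvRowType r == "limitation")),
     ("Future work", l5 ++ rows.filter (fun r => pvRowType r == "recommendation"))] := by
  induction rows generalizing l1 l2 l3 l4 l5 with
  | nil => simp
  | cons r rest ih =>
    simp only [List.foldl_cons]
    have hstep : pvStepA
        (PySem.Dict.mk [("Definitions", l1), ("Main findings", l2), ("Methods", l3),
                        ("Limitations", l4), ("Future work", l5)]) r =
      PySem.Dict.mk
        [("Definitions", if pvRowType r == "definition" then l1 ++ [r] else l1),
         ("Main findings", if pvRowType r == "main_finding" then l2 ++ [r] else l2),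
         ("Methods", if pvRowType r == "method_claim" then l3 ++ [r] else l3),
         ("Limitations", if pvRowType r == "limitation" then l4 ++ [r] else l4),
         ("Future work", if pvRowType r == "recommendation" then l5 ++ [r] else l5)] := by
      unfold pvStepA
      split_ifs <;>
        simp_all [PySem.Dict.modify, PySem.Dict.insert, PySem.Dict.getD, PySem.Dict.get?,
                  PySem.Dict.contains]
    rw [hstep, ih]
    simp only [List.filter_cons]
    split_ifs <;> simp_all

-- ===== VERDICT (by name: the statement is the Claim_ definition above) =====
theorem group_claims_by_section_py_spec : Claim_equal_group_claims_by_section_py := by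
  intro rows _ _
  unfold Spec_group_claims_by_section_py group_claims_by_section_py group_claims_by_section_py_alt pvSections
  rw [pvFoldA_items]
  simp
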